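-- pv_equiv track=rewrite | github.com/minhthienk/innova-simulation-generator | source/Backup/v19.00.03/cls_databases.py | convert_vin10
-- ===== SOURCE A (Python) =====
-- def convert_vin10(year):
--     vin10_list = 'TVWXY123456789ABCDEFGHJK'
--     year_range = [str(x) for x in range(1996,2019+1)]
--     count = 0
--     for x in year_range:
--         if str(int(year)) == year_range[count]:
--             return str(vin10_list[count])
--         count += 1
-- ===== SOURCE B (Python) =====
-- def convert_vin10(year):
--     idx = int(year) - 1996
--     if 0 <= idx < 24:
--         return str('TVWXY123456789ABCDEFGHJK'[idx])
--     return None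
-- ===== Notes on version B (the rewrite author's own statement) =====
-- stated objective: simpler
-- what changed: Replaces the linear scan over the list of candidate year strings (string conversion and comparison at each step) by direct arithmetic indexing with a range guard.
import Mathlib
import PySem

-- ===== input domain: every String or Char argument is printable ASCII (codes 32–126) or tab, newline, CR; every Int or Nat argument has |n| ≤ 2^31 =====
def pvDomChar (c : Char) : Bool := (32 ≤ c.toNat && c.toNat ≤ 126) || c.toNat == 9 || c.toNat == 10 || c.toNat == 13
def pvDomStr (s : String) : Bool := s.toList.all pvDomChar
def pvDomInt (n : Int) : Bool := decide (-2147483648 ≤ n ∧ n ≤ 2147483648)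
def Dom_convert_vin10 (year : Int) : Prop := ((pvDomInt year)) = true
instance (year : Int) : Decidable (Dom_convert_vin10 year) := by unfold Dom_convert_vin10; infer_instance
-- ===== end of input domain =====

-- B replaces A's linear scan over 24 year strings by direct arithmetic indexing with a range guard (simpler).


-- ===== PORT A =====
-- the 'for x in year_range' loop: x runs over the remaining list, count is the running index into the full list
def convert_vin10_loop (s : String) (rest : List String) (full : List String)
    (vin10 : List Char) (count : Int) : Option String :=
  match rest with
  | [] => none
  | _ :: rest' =>
    match PySem.List.pyGet? full count with
    | none => none            -- IndexError (unreachable: count stays in range)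
    | some yr =>
      if s == yr then
        (PySem.List.pyGet? vin10 count).map (fun c => String.ofList [c])
      else
        convert_vin10_loop s rest' full vin10 (count + 1)

def convert_vin10 (year : Int) : Option String :=
  let vin10_list : List Char := "TVWXY123456789ABCDEFGHJK".toList
  let year_range : List String := (PySem.List.pyRange 1996 (2019 + 1) 1).map PySem.Int.toStr
  convert_vin10_loop (PySem.Int.toStr year) year_range year_range vin10_list 0

-- ===== PORT B =====
def convert_vin10_alt (year : Int) : Option String :=
  let idx := year - 1996
  if 0 ≤ idx ∧ idx < 24 then
    (PySem.Str.pyGet? "TVWXY123456789ABCDEFGHJK" idx).map (fun c => String.ofList [c])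
  else
    none

-- ===== PRECONDITION & SPEC =====
def Spec_convert_vin10 (year : Int) (out : Option String) : Prop := out = convert_vin10_alt year
instance (year : Int) (out : Option String) : Decidable (Spec_convert_vin10 year out) := by unfold Spec_convert_vin10; infer_instance

-- ===== CLAIM (what is proved, stated in full; the proofs are below) =====
def Claim_equal_convert_vin10 : Prop := ∀ (year : Int), Dom_convert_vin10 year → Spec_convert_vin10 year (convert_vin10 year)

-- ===== LEMMAS AND PROOFS =====

-- evaluate a digit list back to the number it denotes ('0'-'9' chars)
def pvDigitsVal (a : Nat) (cs : List Char) : Nat :=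
  cs.foldl (fun a c => 10 * a + (c.toNat - 48)) a

-- pvG a n: what pvDigitsVal yields after the digits of n are appended to accumulator a
def pvG (a n : Nat) : Nat :=
  if n < 10 then 10 * a + n else 10 * pvG a (n / 10) + n % 10
decreasing_by exact Nat.div_lt_self (by omega) (by omega)

theorem pvG_eq (a n : Nat) : pvG a n = if n < 10 then 10 * a + n else 10 * pvG a (n / 10) + n % 10 := by
  rw [pvG]

theorem pvG_zero (n : Nat) : pvG 0 n = n := by
  induction n using Nat.strong_induction_on with
  | _ n ih =>
    unfold pvG
    split
    · omega
    · rw [ih (n / 10) (Nat.div_lt_self (by omega) (by omega))]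
      omega

theorem pvDigitsVal_toDigitsCore (f : Nat) :
    ∀ (n a : Nat) (ds : List Char), n < f →
      pvDigitsVal a (Nat.toDigitsCore 10 f n ds) = pvDigitsVal (pvG a n) ds := by
  induction f with
  | zero => intro n a ds h; omega
  | succ f ih =>
    intro n a ds h
    rw [Nat.toDigitsCore]
    have hm : n % 10 < 10 := Nat.mod_lt _ (by omega)
    have hdc : (Nat.digitChar (n % 10)).toNat - 48 = n % 10 := by
      interval_cases h : (n % 10) <;> decide
    by_cases h0 : n / 10 = 0
    · simp only [h0]
      have hn : n < 10 := by omega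
      show pvDigitsVal a (Nat.digitChar (n % 10) :: ds) = _
      unfold pvDigitsVal
      rw [List.foldl_cons]
      simp only [hdc]
      rw [pvG_eq, if_pos hn, Nat.mod_eq_of_lt hn]
    · rw [if_neg h0]
      rw [ih (n / 10) a _ (by omega)]
      unfold pvDigitsVal
      rw [List.foldl_cons]
      simp only [hdc]
      rw [pvG_eq a n, if_neg (by omega)]

theorem pvDigitsVal_toDigits (n : Nat) : pvDigitsVal 0 (Nat.toDigits 10 n) = n := by
  unfold Nat.toDigits
  rw [pvDigitsVal_toDigitsCore (n + 1) n 0 [] (by omega), pvG_zero]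
  rfl

theorem toDigits_mem_ge (f : Nat) :
    ∀ (n : Nat) (ds : List Char), (∀ c ∈ ds, 48 ≤ c.toNat) →
      ∀ c ∈ Nat.toDigitsCore 10 f n ds, 48 ≤ c.toNat := by
  induction f with
  | zero => intro n ds hds c hc; exact hds c hc
  | succ f ih =>
    intro n ds hds c hc
    rw [Nat.toDigitsCore] at hc
    have hm : n % 10 < 10 := Nat.mod_lt _ (by omega)
    have hd : 48 ≤ (Nat.digitChar (n % 10)).toNat := by
      interval_cases h : (n % 10) <;> decide
    by_cases h0 : n / 10 = 0
    · simp only [h0] at hc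
      rw [if_true] at hc
      rcases List.mem_cons.mp hc with h | h
      · rw [h]; exact hd
      · exact hds c h
    · rw [if_neg h0] at hc
      exact ih (n / 10) _ (by
        intro c' hc'
        rcases List.mem_cons.mp hc' with h | h
        · rw [h]; exact hd
        · exact hds c' h) c hc

-- str(a) = str(b) → a = b (Python's int-to-string is injective)
theorem toStr_inj {a b : Int} (h : PySem.Int.toStr a = PySem.Int.toStr b) : a = b := by
  have h' : PySem.Int.toChars a = PySem.Int.toChars b := by
    rw [← PySem.Int.toList_toStr, ← PySem.Int.toList_toStr, h]
  unfold PySem.Int.toChars at h'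
  by_cases ha : a < 0 <;> by_cases hb : b < 0
  · rw [if_pos ha, if_pos hb] at h'
    have := List.cons.inj h'
    have hval := congrArg (pvDigitsVal 0) this.2
    rw [pvDigitsVal_toDigits, pvDigitsVal_toDigits] at hval
    omega
  · rw [if_pos ha, if_neg hb] at h'
    exfalso
    have : '-' ∈ Nat.toDigits 10 b.toNat := by rw [← h']; exact List.mem_cons_self
    have := toDigits_mem_ge (b.toNat + 1) b.toNat [] (by simp) '-' this
    simp at this
  · rw [if_neg ha, if_pos hb] at h'
    exfalso
    have : '-' ∈ Nat.toDigits 10 a.toNat := by rw [h']; exact List.mem_cons_self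
    have := toDigits_mem_ge (a.toNat + 1) a.toNat [] (by simp) '-' this
    simp at this
  · rw [if_neg ha, if_neg hb] at h'
    have hval := congrArg (pvDigitsVal 0) h'
    rw [pvDigitsVal_toDigits, pvDigitsVal_toDigits] at hval
    omega

theorem loop_none (s : String) (vin : List Char) :
    ∀ (rest full : List String) (count : Int),
      (∀ t ∈ full, s ≠ t) → convert_vin10_loop s rest full vin count = none := by
  intro rest
  induction rest with
  | nil => intro full count _; rfl
  | cons x rest' ih =>
    intro full count h
    unfold convert_vin10_loop
    cases hg : PySem.List.pyGet? full count with
    | none => rfl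
    | some yr =>
      have hmem := PySem.List.mem_of_pyGet?_eq_some full hg
      have hne : (s == yr) = false := beq_eq_false_iff_ne.mpr (h yr hmem)
      simp only [hne, Bool.false_eq_true, if_false]
      exact ih full (count + 1) h

theorem convert_vin10_eq_outside (year : Int) (h : year < 1996 ∨ 2019 < year) :
    convert_vin10 year = convert_vin10_alt year := by
  have hA : convert_vin10 year = none := by
    unfold convert_vin10
    apply loop_none
    intro t ht
    rcases List.mem_map.mp ht with ⟨k, hk, rfl⟩
    have hk' := PySem.List.mem_pyRange_one.mp hk
    intro heq
    have := toStr_inj heq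
    omega
  have hB : convert_vin10_alt year = none := by
    unfold convert_vin10_alt
    rw [if_neg (by omega)]
  rw [hA, hB]

-- ===== VERDICT (by name: the statement is the Claim_ definition above) =====
theorem convert_vin10_spec : Claim_equal_convert_vin10 := by
  intro year _
  unfold Spec_convert_vin10
  by_cases h1 : 1996 ≤ year
  · by_cases h2 : year ≤ 2019
    · interval_cases year <;> decide
    · exact convert_vin10_eq_outside year (Or.inr (by omega))
  · exact convert_vin10_eq_outside year (Or.inl (by omega))
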